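-- pv_equiv track=rewrite | github.com/poshan0126/Think-Chicago-Skill-Builders-Software-Engineering | Lesson 5 Python Functions/5_grade_analyzer.py | categorize_grades
-- ===== SOURCE A (Python) =====
-- def categorize_grades(grades):
--     grade_categories = {'A': [], 'B': [], 'C': [], 'D': [], 'F': []}
--     for grade in grades:
--         if grade >= 90:
--             grade_categories['A'].append(grade)
--         elif grade >= 80:
--             grade_categories['B'].append(grade)
--         elif grade >= 70:
--             grade_categories['C'].append(grade)
--         elif grade >= 60:
--             grade_categories['D'].append(grade)
--         else:
--             grade_categories['F'].append(grade)
--     return grade_categories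
-- ===== SOURCE B (Python) =====
-- def categorize_grades(grades):
--     return {
--         'A': [g for g in grades if g >= 90],
--         'B': [g for g in grades if 80 <= g < 90],
--         'C': [g for g in grades if 70 <= g < 80],
--         'D': [g for g in grades if 60 <= g < 70],
--         'F': [g for g in grades if g < 60],
--     }
-- ===== Notes on version B (the rewrite author's own statement) =====
-- stated objective: alternative
-- what changed: Replaces the single pass with an if/elif cascade updating a mutable dict by five independent range-filter comprehensions, one per letter bucket, assembled directly into the result dict literal.
import Mathlib
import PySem

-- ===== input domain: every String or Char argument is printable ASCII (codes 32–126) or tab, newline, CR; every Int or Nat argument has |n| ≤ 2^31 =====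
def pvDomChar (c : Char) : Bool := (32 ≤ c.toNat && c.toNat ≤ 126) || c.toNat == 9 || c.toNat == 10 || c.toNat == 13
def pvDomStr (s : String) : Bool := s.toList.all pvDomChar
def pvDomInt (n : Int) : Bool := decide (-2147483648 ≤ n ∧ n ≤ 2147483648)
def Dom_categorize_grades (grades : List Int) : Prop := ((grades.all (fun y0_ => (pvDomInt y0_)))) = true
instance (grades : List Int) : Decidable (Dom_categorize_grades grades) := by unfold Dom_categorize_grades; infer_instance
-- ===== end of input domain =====

-- B replaces A's single-pass if/elif cascade over a mutable dict with five independent range filters, one per letter (alternative decomposition, same cost).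


-- ===== PORT A =====
def categorize_grades (grades : List Int) : List (String × List Int) :=
  (grades.foldl (fun d g =>
      if g ≥ 90 then d.modify "A" [] (· ++ [g])
      else if g ≥ 80 then d.modify "B" [] (· ++ [g])
      else if g ≥ 70 then d.modify "C" [] (· ++ [g])
      else if g ≥ 60 then d.modify "D" [] (· ++ [g])
      else d.modify "F" [] (· ++ [g]))
    (PySem.Dict.ofList [("A", []), ("B", []), ("C", []), ("D", []), ("F", [])])).items

-- ===== PORT B =====
def categorize_grades_alt (grades : List Int) : List (String × List Int) :=
  [("A", grades.filter (fun g => decide (90 ≤ g))),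
   ("B", grades.filter (fun g => decide (80 ≤ g ∧ g < 90))),
   ("C", grades.filter (fun g => decide (70 ≤ g ∧ g < 80))),
   ("D", grades.filter (fun g => decide (60 ≤ g ∧ g < 70))),
   ("F", grades.filter (fun g => decide (g < 60)))]

-- ===== PRECONDITION & SPEC =====
def Spec_categorize_grades (grades : List Int) (out : List (String × List Int)) : Prop := out = categorize_grades_alt grades
instance (grades : List Int) (out : List (String × List Int)) : Decidable (Spec_categorize_grades grades out) := by unfold Spec_categorize_grades; infer_instance

-- ===== CLAIM (what is proved, stated in full; the proofs are below) =====
def Claim_equal_categorize_grades : Prop := ∀ (grades : List Int), Dom_categorize_grades grades → Spec_categorize_grades grades (categorize_grades grades)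

-- ===== LEMMAS AND PROOFS =====

lemma stepA (a b c d f : List Int) (g : Int) :
    ((PySem.Dict.mk [("A", a), ("B", b), ("C", c), ("D", d), ("F", f)]).modify "A" [] (· ++ [g])) = PySem.Dict.mk [("A", a ++ [g]), ("B", b), ("C", c), ("D", d), ("F", f)] := rfl

lemma stepB (a b c d f : List Int) (g : Int) :
    ((PySem.Dict.mk [("A", a), ("B", b), ("C", c), ("D", d), ("F", f)]).modify "B" [] (· ++ [g])) = PySem.Dict.mk [("A", a), ("B", b ++ [g]), ("C", c), ("D", d), ("F", f)] := rfl

lemma stepC (a b c d f : List Int) (g : Int) :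
    ((PySem.Dict.mk [("A", a), ("B", b), ("C", c), ("D", d), ("F", f)]).modify "C" [] (· ++ [g])) = PySem.Dict.mk [("A", a), ("B", b), ("C", c ++ [g]), ("D", d), ("F", f)] := rfl

lemma stepD (a b c d f : List Int) (g : Int) :
    ((PySem.Dict.mk [("A", a), ("B", b), ("C", c), ("D", d), ("F", f)]).modify "D" [] (· ++ [g])) = PySem.Dict.mk [("A", a), ("B", b), ("C", c), ("D", d ++ [g]), ("F", f)] := rfl

lemma stepF (a b c d f : List Int) (g : Int) :
    ((PySem.Dict.mk [("A", a), ("B", b), ("C", c), ("D", d), ("F", f)]).modify "F" [] (· ++ [g])) = PySem.Dict.mk [("A", a), ("B", b), ("C", c), ("D", d), ("F", f ++ [g])] := rfl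

-- loop invariant: A's fold from any five-bucket literal dict appends exactly the five filters
lemma categorize_loop (gs : List Int) (a b c d f : List Int) :
    (gs.foldl (fun d g =>
      if g ≥ 90 then d.modify "A" [] (· ++ [g])
      else if g ≥ 80 then d.modify "B" [] (· ++ [g])
      else if g ≥ 70 then d.modify "C" [] (· ++ [g])
      else if g ≥ 60 then d.modify "D" [] (· ++ [g])
      else d.modify "F" [] (· ++ [g]))
      (PySem.Dict.mk [("A", a), ("B", b), ("C", c), ("D", d), ("F", f)])).items
    = [("A", a ++ gs.filter (fun g => decide (90 ≤ g))),
       ("B", b ++ gs.filter (fun g => decide (80 ≤ g ∧ g < 90))),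
       ("C", c ++ gs.filter (fun g => decide (70 ≤ g ∧ g < 80))),
       ("D", d ++ gs.filter (fun g => decide (60 ≤ g ∧ g < 70))),
       ("F", f ++ gs.filter (fun g => decide (g < 60)))] := by
  induction gs generalizing a b c d f with
  | nil => simp
  | cons g gs ih =>
    simp only [List.foldl_cons, List.filter_cons]
    by_cases h1 : 90 ≤ g
    · rw [if_pos (show g ≥ 90 from h1), stepA, ih]
      simp [h1, show ¬ g < 90 by omega, show ¬ g < 80 by omega,
        show ¬ g < 70 by omega, show ¬ g < 60 by omega]
    · by_cases h2 : 80 ≤ g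
      · rw [if_neg (show ¬ g ≥ 90 from h1), if_pos (show g ≥ 80 from h2), stepB, ih]
        simp [h1, h2, show g < 90 by omega, show ¬ g < 70 by omega, show ¬ g < 60 by omega]
      · by_cases h3 : 70 ≤ g
        · rw [if_neg (show ¬ g ≥ 90 from h1), if_neg (show ¬ g ≥ 80 from h2),
            if_pos (show g ≥ 70 from h3), stepC, ih]
          simp [h1, h2, h3, show g < 80 by omega, show ¬ g < 60 by omega]
        · by_cases h4 : 60 ≤ g
          · rw [if_neg (show ¬ g ≥ 90 from h1), if_neg (show ¬ g ≥ 80 from h2),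
              if_neg (show ¬ g ≥ 70 from h3), if_pos (show g ≥ 60 from h4), stepD, ih]
            simp [h1, h2, h3, h4, show g < 70 by omega]
          · rw [if_neg (show ¬ g ≥ 90 from h1), if_neg (show ¬ g ≥ 80 from h2),
              if_neg (show ¬ g ≥ 70 from h3), if_neg (show ¬ g ≥ 60 from h4), stepF, ih]
            simp [h1, h2, h3, h4, show g < 60 by omega]

-- ===== VERDICT (by name: the statement is the Claim_ definition above) =====
theorem categorize_grades_spec : Claim_equal_categorize_grades := by
  intro grades _
  show categorize_grades grades = categorize_grades_alt grades
  simpa [categorize_grades, categorize_grades_alt, PySem.Dict.ofList] using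
    categorize_loop grades [] [] [] [] []
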